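-- pv_equiv track=rewrite | github.com/paiml/depyler | examples/hard_edge_string_build.py | build_digits
-- ===== SOURCE A (Python) =====
-- def build_digits(n: int) -> str:
--     """Build string of digits 0 to n-1 (mod 10)."""
--     result: str = ""
--     i: int = 0
--     while i < n:
--         d: int = i % 10
--         result = result + chr(48 + d)
--         i = i + 1
--     return result
-- ===== SOURCE B (Python) =====
-- def build_digits(n: int) -> str:
--     """Build string of digits 0 to n-1 (mod 10)."""
--     base = "0123456789"
--     m = max(n, 0)
--     return base * (m // 10) + base[:m % 10]
-- ===== Notes on version B (the rewrite author's own statement) =====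
-- stated objective: faster
-- what changed: Replaces the per-index while loop over 0..n-1 with a closed-form assembly: the output is the periodic block '0123456789' repeated m//10 times plus a slice of the first m%10 digits.
import Mathlib
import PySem

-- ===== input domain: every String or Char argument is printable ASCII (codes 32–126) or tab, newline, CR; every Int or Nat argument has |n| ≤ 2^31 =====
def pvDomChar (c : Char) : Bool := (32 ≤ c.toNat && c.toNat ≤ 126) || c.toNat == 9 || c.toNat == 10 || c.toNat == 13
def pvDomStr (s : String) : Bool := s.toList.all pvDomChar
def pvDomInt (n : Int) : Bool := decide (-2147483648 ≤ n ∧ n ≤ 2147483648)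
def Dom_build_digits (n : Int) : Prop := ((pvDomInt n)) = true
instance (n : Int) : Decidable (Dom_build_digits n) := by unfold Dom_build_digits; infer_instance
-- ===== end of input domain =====

-- B replaces the per-index while loop with closed-form block assembly: "0123456789" repeated m//10 times plus its first m%10 characters (m = max(n,0)); measurably faster in Python (no per-character loop).


-- ===== PORT A =====
-- while i < n: result = result + chr(48 + i % 10); i = i + 1
def buildLoopA (result : String) (i n : Int) : String :=
  if i < n then
    buildLoopA (result ++ String.ofList [Char.ofNat (48 + PySem.Int.mod i 10).toNat]) (i + 1) n
  else result
termination_by (n - i).toNat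
decreasing_by omega

def build_digits (n : Int) : String := buildLoopA "" 0 n

-- ===== PORT B =====
-- Python 's * k' (concatenate k copies of s, empty for k ≤ 0)
def pyStrMul (s : String) (k : Int) : String :=
  if 0 < k then s ++ pyStrMul s (k - 1) else ""
termination_by k.toNat
decreasing_by omega

def build_digits_alt (n : Int) : String :=
  let base := "0123456789"
  let m := max n 0
  pyStrMul base (PySem.Int.floordiv m 10) ++ PySem.Str.slice base none (some (PySem.Int.mod m 10))

-- ===== PRECONDITION & SPEC =====
def Spec_build_digits (n : Int) (out : String) : Prop := out = build_digits_alt n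
instance (n : Int) (out : String) : Decidable (Spec_build_digits n out) := by unfold Spec_build_digits; infer_instance

-- ===== CLAIM (what is proved, stated in full; the proofs are below) =====
def Claim_equal_build_digits : Prop := ∀ (n : Int), Dom_build_digits n → Spec_build_digits n (build_digits n)

-- ===== LEMMAS AND PROOFS =====

/-- The digit character the loop writes at index `k`. -/
def pvDigit (k : Nat) : Char := Char.ofNat (48 + k % 10)

def pvBase : List Char := "0123456789".toList

lemma pvDigit_add_ten (k : Nat) : pvDigit (10 + k) = pvDigit k := by
  simp [pvDigit, Nat.add_mod_left]

lemma char_of_mod (i : Int) (hi : 0 ≤ i) :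
    Char.ofNat (48 + PySem.Int.mod i 10).toNat = pvDigit i.toNat := by
  have h : PySem.Int.mod i 10 = i % 10 := PySem.Int.mod_eq_emod_of_pos (by omega)
  unfold pvDigit
  congr 1
  rw [h]
  omega

lemma pvDigit_shift (q x : Nat) : pvDigit (10 * q + x) = pvDigit x := by
  unfold pvDigit; congr 1; omega

lemma buildLoopA_eq (fuel : Nat) (n i : Int) (res : String)
    (hi : 0 ≤ i) (hf : (n - i).toNat = fuel) :
    buildLoopA res i n =
      res ++ String.ofList (((List.range fuel).map (fun j => pvDigit (i.toNat + j)))) := by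
  induction fuel generalizing i res with
  | zero =>
      rw [buildLoopA]
      have : ¬ i < n := by omega
      simp [this]
  | succ k ih =>
      rw [buildLoopA]
      have hlt : i < n := by omega
      simp only [if_pos hlt]
      rw [ih (i + 1) _ (by omega) (by omega)]
      have hstep : ∀ j, (i + 1).toNat + j = i.toNat + (j + 1) := by omega
      rw [List.range_succ_eq_map]
      simp only [List.map_cons, List.map_map, Nat.add_zero]
      rw [char_of_mod i hi]
      apply String.ext
      simp [Function.comp, hstep]

lemma build_digits_eq (n : Int) :
    build_digits n = String.ofList ((List.range n.toNat).map pvDigit) := by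
  unfold build_digits
  rw [buildLoopA_eq n.toNat n 0 "" le_rfl (by omega)]
  apply String.ext
  simp

lemma pyStrMul_base (k : Nat) :
    pyStrMul "0123456789" (k : Int) = String.ofList ((List.range (10 * k)).map pvDigit) := by
  induction k with
  | zero => rw [pyStrMul]; simp
  | succ m ih =>
      rw [pyStrMul]
      have h1 : (0 : Int) < ((m + 1 : Nat) : Int) := by positivity
      have h2 : ((m + 1 : Nat) : Int) - 1 = (m : Int) := by push_cast; ring
      rw [if_pos h1, h2, ih]
      have hr : 10 * (m + 1) = 10 + 10 * m := by ring
      rw [hr, List.range_add]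
      apply String.ext
      simp only [List.map_append, List.map_map]
      have : (List.map (pvDigit ∘ fun x => 10 + x) (List.range (10 * m)))
           = (List.map pvDigit (List.range (10 * m))) := by
        apply List.map_congr_left
        intro x _
        simp [Function.comp, pvDigit_add_ten]
      rw [this]
      have hb : ("0123456789" : String) = String.ofList ((List.range 10).map pvDigit) := by decide
      conv_lhs => rw [hb]
      simp

lemma take_base (r : Nat) (hr : r ≤ 10) :
    pvBase.take r = (List.range r).map pvDigit := by
  interval_cases r <;> decide

lemma slice_base (b : Int) (hb : 0 ≤ b) :
    PySem.Str.slice "0123456789" none (some b) = String.ofList (pvBase.take b.toNat) := by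
  simp [PySem.Str.slice, PySem.List.slice_to _ hb, pvBase]

lemma build_digits_alt_eq (n : Int) :
    build_digits_alt n = String.ofList ((List.range n.toNat).map pvDigit) := by
  unfold build_digits_alt
  have hm : max n 0 = ((n.toNat : Nat) : Int) := by omega
  simp only [hm]
  rw [show ((10 : Int)) = ((10 : Nat) : Int) by norm_num,
      PySem.Int.floordiv_natCast, PySem.Int.mod_natCast]
  rw [pyStrMul_base, slice_base _ (by positivity)]
  simp only [Int.toNat_natCast]
  rw [take_base _ (by omega)]
  apply String.ext
  simp only [String.toList_append, String.toList_ofList]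
  have hM : n.toNat = 10 * (n.toNat / 10) + n.toNat % 10 := by omega
  conv_rhs => rw [hM, List.range_add]
  rw [List.map_append, List.map_map]
  congr 1
  apply List.map_congr_left
  intro x _
  simp [Function.comp, pvDigit_shift]

-- ===== VERDICT (by name: the statement is the Claim_ definition above) =====
theorem build_digits_spec : Claim_equal_build_digits := by
  intro n _
  unfold Spec_build_digits
  rw [build_digits_eq, build_digits_alt_eq]
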